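-- pv_equiv track=rewrite | github.com/zoemolybell-stack/noon--selection-tool | generate_pricing_v6.py | gen_size_tier_formula
-- ===== SOURCE A (Python) =====
-- def gen_size_tier_formula(r, l_col, w_col, h_col):
--     """Generate FBN size tier formula using MEDIAN/MAX/MIN (no LET)."""
--     mx = f'MAX({l_col}{r},{w_col}{r},{h_col}{r})'
--     md = f'MEDIAN({l_col}{r},{w_col}{r},{h_col}{r})'
--     mn = f'MIN({l_col}{r},{w_col}{r},{h_col}{r})'
--     tiers = [
--         (20, 15, 1, "Small Envelope"),
--         (33, 23, 2.5, "Standard Envelope"),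
--         (33, 23, 5, "Large Envelope"),
--         (45, 34, 26, "Standard Parcel"),
--         (130, 34, 26, "Oversize"),
--         (130, 130, 130, "Extra Oversize"),
--     ]
--     result = '"Bulky"'
--     for max_l, max_w, max_h, name in reversed(tiers):
--         result = f'IF(AND({mx}<={max_l},{md}<={max_w},{mn}<={max_h}),"{name}",{result})'
--     return f'={result}'
-- ===== SOURCE B (Python) =====
-- _TEMPLATE = ('=IF(AND(MAX(\x01,\x02,\x03)<=20,MEDIAN(\x01,\x02,\x03)<=15,MIN(\x01,\x02,\x03)<=1),"Small Envelope",IF(AND(MAX(\x01,\x02,\x03)<=33,MEDIAN(\x01,\x02,\x03)<=23,MIN(\x01,\x02,\x03)<=2.5),"Standard Envelope",IF(AND(MAX(\x01,\x02,\x03)<=33,MEDIAN(\x01,\x02,\x03)<=23,MIN(\x01,\x02,\x03)<=5),"Large Envelope",IF(AND(MAX(\x01,\x02,\x03)<=45,MEDIAN(\x01,\x02,\x03)<=34,MIN(\x01,\x02,\x03)<=26),"Standard Parcel",IF(AND(MAX(\x01,\x02,\x03)<=130,MEDIAN(\x01,\x02,\x03)<=34,MIN(\x01,\x02,\x03)<=26),"Oversize",IF(AND(MAX(\x01,\x02,\x03)<=130,MEDIAN(\x01,\x02,\x03)<=130,MIN(\x01,\x02,\x03)<=130),"Extra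 Oversize","Bulky"))))))')
--
--
-- def gen_size_tier_formula(r, l_col, w_col, h_col):
--     """Generate FBN size tier formula: single-pass substitution into a
--     precomputed nested-IF template (placeholders \\x01/\\x02/\\x03 mark
--     the three cell references)."""
--     refs = {'\x01': f'{l_col}{r}', '\x02': f'{w_col}{r}', '\x03': f'{h_col}{r}'}
--     return ''.join(refs.get(c, c) for c in _TEMPLATE)
-- ===== Notes on version B (the rewrite author's own statement) =====
-- stated objective: alternative
-- what changed: Since the tier table is a fixed constant, B precomputes the whole nested-IF formula once as a module-level template string with placeholder bytes for the three cell references and produces the result by a single-pass character substitution, instead of A's reversed loop that rebuilds mx/md/mn f-strings and wraps an inside-out accumulator.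
import Mathlib
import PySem

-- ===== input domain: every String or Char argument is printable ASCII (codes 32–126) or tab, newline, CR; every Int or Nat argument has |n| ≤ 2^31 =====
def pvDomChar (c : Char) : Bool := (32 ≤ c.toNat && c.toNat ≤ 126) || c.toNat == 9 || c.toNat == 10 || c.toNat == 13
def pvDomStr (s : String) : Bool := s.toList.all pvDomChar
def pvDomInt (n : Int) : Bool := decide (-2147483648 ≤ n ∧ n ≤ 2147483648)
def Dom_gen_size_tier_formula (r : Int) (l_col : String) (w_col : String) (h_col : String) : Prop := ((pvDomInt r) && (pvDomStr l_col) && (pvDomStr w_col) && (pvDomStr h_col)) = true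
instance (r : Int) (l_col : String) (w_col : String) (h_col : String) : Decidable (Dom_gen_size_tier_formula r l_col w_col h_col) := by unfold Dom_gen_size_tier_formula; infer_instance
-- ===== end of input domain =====

set_option maxRecDepth 8000


-- B replaces A's reversed accumulator loop by a single-pass substitution of the
-- three cell references into a precomputed nested-IF template; objective:
-- alternative decomposition, same cost.

-- ===== PORT A =====
-- The tiers table; the numeric bounds (ints and the float 2.5) only ever appear
-- through str() in the f-strings, so they are ported as their exact str()
-- renderings (constants; exact by inspection).
def pvTiers : List (String × String × String × String) :=
  [("20", "15", "1", "Small Envelope"),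
   ("33", "23", "2.5", "Standard Envelope"),
   ("33", "23", "5", "Large Envelope"),
   ("45", "34", "26", "Standard Parcel"),
   ("130", "34", "26", "Oversize"),
   ("130", "130", "130", "Extra Oversize")]

-- Strings are handled on the List Char side (kernel-reducible); f-string
-- concatenation is ++ on the char lists, str(r) is PySem.Int.toChars.
def gen_size_tier_formula (r : Int) (l_col : String) (w_col : String) (h_col : String) : String :=
  let rs := PySem.Int.toChars r
  let mx := "MAX(".toList ++ l_col.toList ++ rs ++ ",".toList ++ w_col.toList ++ rs ++ ",".toList ++ h_col.toList ++ rs ++ ")".toList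
  let md := "MEDIAN(".toList ++ l_col.toList ++ rs ++ ",".toList ++ w_col.toList ++ rs ++ ",".toList ++ h_col.toList ++ rs ++ ")".toList
  let mn := "MIN(".toList ++ l_col.toList ++ rs ++ ",".toList ++ w_col.toList ++ rs ++ ",".toList ++ h_col.toList ++ rs ++ ")".toList
  let result := pvTiers.reverse.foldl (fun res t =>
    "IF(AND(".toList ++ mx ++ "<=".toList ++ t.1.toList ++ ",".toList
      ++ md ++ "<=".toList ++ t.2.1.toList ++ ",".toList
      ++ mn ++ "<=".toList ++ t.2.2.1.toList ++ "),\"".toList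
      ++ t.2.2.2.toList ++ "\",".toList ++ res ++ ")".toList) "\"Bulky\"".toList
  String.ofList ("=".toList ++ result)

-- ===== PORT B =====
-- Source B's module constant _TEMPLATE, byte for byte, on the List Char side
-- (\x01/\x02/\x03 are the placeholders for the three cell references).
def pvTemplate : List Char :=
  ['=', 'I', 'F', '(', 'A', 'N', 'D', '(', 'M', 'A', 'X', '(', '\x01', ',', '\x02', ',', '\x03', ')', '<', '=',
   '2', '0', ',', 'M', 'E', 'D', 'I', 'A', 'N', '(', '\x01', ',', '\x02', ',', '\x03', ')', '<', '=', '1', '5',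
   ',', 'M', 'I', 'N', '(', '\x01', ',', '\x02', ',', '\x03', ')', '<', '=', '1', ')', ',', '"', 'S', 'm', 'a',
   'l', 'l', ' ', 'E', 'n', 'v', 'e', 'l', 'o', 'p', 'e', '"', ',', 'I', 'F', '(', 'A', 'N', 'D', '(',
   'M', 'A', 'X', '(', '\x01', ',', '\x02', ',', '\x03', ')', '<', '=', '3', '3', ',', 'M', 'E', 'D', 'I', 'A',
   'N', '(', '\x01', ',', '\x02', ',', '\x03', ')', '<', '=', '2', '3', ',', 'M', 'I', 'N', '(', '\x01', ',', '\x02',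
   ',', '\x03', ')', '<', '=', '2', '.', '5', ')', ',', '"', 'S', 't', 'a', 'n', 'd', 'a', 'r', 'd', ' ',
   'E', 'n', 'v', 'e', 'l', 'o', 'p', 'e', '"', ',', 'I', 'F', '(', 'A', 'N', 'D', '(', 'M', 'A', 'X',
   '(', '\x01', ',', '\x02', ',', '\x03', ')', '<', '=', '3', '3', ',', 'M', 'E', 'D', 'I', 'A', 'N', '(', '\x01',
   ',', '\x02', ',', '\x03', ')', '<', '=', '2', '3', ',', 'M', 'I', 'N', '(', '\x01', ',', '\x02', ',', '\x03', ')',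
   '<', '=', '5', ')', ',', '"', 'L', 'a', 'r', 'g', 'e', ' ', 'E', 'n', 'v', 'e', 'l', 'o', 'p', 'e',
   '"', ',', 'I', 'F', '(', 'A', 'N', 'D', '(', 'M', 'A', 'X', '(', '\x01', ',', '\x02', ',', '\x03', ')', '<',
   '=', '4', '5', ',', 'M', 'E', 'D', 'I', 'A', 'N', '(', '\x01', ',', '\x02', ',', '\x03', ')', '<', '=', '3',
   '4', ',', 'M', 'I', 'N', '(', '\x01', ',', '\x02', ',', '\x03', ')', '<', '=', '2', '6', ')', ',', '"', 'S',
   't', 'a', 'n', 'd', 'a', 'r', 'd', ' ', 'P', 'a', 'r', 'c', 'e', 'l', '"', ',', 'I', 'F', '(', 'A',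
   'N', 'D', '(', 'M', 'A', 'X', '(', '\x01', ',', '\x02', ',', '\x03', ')', '<', '=', '1', '3', '0', ',', 'M',
   'E', 'D', 'I', 'A', 'N', '(', '\x01', ',', '\x02', ',', '\x03', ')', '<', '=', '3', '4', ',', 'M', 'I', 'N',
   '(', '\x01', ',', '\x02', ',', '\x03', ')', '<', '=', '2', '6', ')', ',', '"', 'O', 'v', 'e', 'r', 's', 'i',
   'z', 'e', '"', ',', 'I', 'F', '(', 'A', 'N', 'D', '(', 'M', 'A', 'X', '(', '\x01', ',', '\x02', ',', '\x03',
   ')', '<', '=', '1', '3', '0', ',', 'M', 'E', 'D', 'I', 'A', 'N', '(', '\x01', ',', '\x02', ',', '\x03', ')',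
   '<', '=', '1', '3', '0', ',', 'M', 'I', 'N', '(', '\x01', ',', '\x02', ',', '\x03', ')', '<', '=', '1', '3',
   '0', ')', ',', '"', 'E', 'x', 't', 'r', 'a', ' ', 'O', 'v', 'e', 'r', 's', 'i', 'z', 'e', '"', ',',
   '"', 'B', 'u', 'l', 'k', 'y', '"', ')', ')', ')', ')', ')', ')']

-- ''.join(refs.get(c, c) for c in _TEMPLATE): the 3-entry dict lookup with a
-- default is ported as the corresponding 3-way if-chain; the join over the
-- generator is flatMap over the template's characters.
def gen_size_tier_formula_alt (r : Int) (l_col : String) (w_col : String) (h_col : String) : String :=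
  let lr := l_col.toList ++ PySem.Int.toChars r
  let wr := w_col.toList ++ PySem.Int.toChars r
  let hr := h_col.toList ++ PySem.Int.toChars r
  String.ofList (pvTemplate.flatMap (fun c =>
    if c = '\x01' then lr else if c = '\x02' then wr else if c = '\x03' then hr else [c]))

-- ===== PRECONDITION & SPEC =====
def Spec_gen_size_tier_formula (r : Int) (l_col : String) (w_col : String) (h_col : String) (out : String) : Prop := out = gen_size_tier_formula_alt r l_col w_col h_col
instance (r : Int) (l_col : String) (w_col : String) (h_col : String) (out : String) : Decidable (Spec_gen_size_tier_formula r l_col w_col h_col out) := by unfold Spec_gen_size_tier_formula; infer_instance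

-- ===== CLAIM =====
def Claim_equal_gen_size_tier_formula : Prop := ∀ (r : Int) (l_col : String) (w_col : String) (h_col : String), Dom_gen_size_tier_formula r l_col w_col h_col → Spec_gen_size_tier_formula r l_col w_col h_col (gen_size_tier_formula r l_col w_col h_col)

-- ===== LEMMAS AND PROOFS =====
-- Both sides unfold to the same right-associated concatenation of literal
-- fragments and the three variable cell references.
theorem gen_size_tier_formula_eq_alt (r : Int) (l_col : String) (w_col : String) (h_col : String) :
    gen_size_tier_formula r l_col w_col h_col = gen_size_tier_formula_alt r l_col w_col h_col := by
  simp only [gen_size_tier_formula, gen_size_tier_formula_alt, pvTiers, pvTemplate,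
    List.reverse_cons, List.reverse_nil, List.nil_append, List.cons_append,
    List.foldl_cons, List.foldl_nil, List.flatMap_cons, List.flatMap_nil,
    List.append_nil, Char.reduceEq, reduceIte, List.append_assoc]
  rfl

-- ===== VERDICT =====
theorem gen_size_tier_formula_spec : Claim_equal_gen_size_tier_formula := by
  intro r l w h _
  unfold Spec_gen_size_tier_formula
  exact gen_size_tier_formula_eq_alt r l w h
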